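-- pv_equiv track=rewrite | github.com/tgree/tkdraw | tkdraw/tk/elems.py | _vertices_to_args
-- ===== SOURCE A (Python) =====
-- def _vertices_to_args(vertices):
--     min_x = min(v[0] for v in vertices)
--     max_x = max(v[0] for v in vertices)
--     min_y = min(v[1] for v in vertices)
--     max_y = max(v[1] for v in vertices)
--     w     = max_x - min_x
--     h     = max_y - min_y
--     args  = []
--     for v in vertices:
--         args.append(v[0])
--         args.append(v[1])
--     return args, min_x, min_y, w, h
-- ===== SOURCE B (Python) =====
-- def _vertices_to_args(vertices):
--     if not vertices:
--         raise ValueError('min() arg is an empty sequence')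
--     (min_x, min_y) = vertices[0]
--     max_x, max_y = min_x, min_y
--     args = []
--     for (x, y) in vertices:
--         if x < min_x:
--             min_x = x
--         if x > max_x:
--             max_x = x
--         if y < min_y:
--             min_y = y
--         if y > max_y:
--             max_y = y
--         args.append(x)
--         args.append(y)
--     return args, min_x, min_y, max_x - min_x, max_y - min_y
-- ===== Notes on version B (the rewrite author's own statement) =====
-- stated objective: faster
-- what changed: Replaces A's four separate min/max generator scans plus a flatten loop (five passes) with a single fused pass that maintains the four extrema and the flattened list together.
import Mathlib
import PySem

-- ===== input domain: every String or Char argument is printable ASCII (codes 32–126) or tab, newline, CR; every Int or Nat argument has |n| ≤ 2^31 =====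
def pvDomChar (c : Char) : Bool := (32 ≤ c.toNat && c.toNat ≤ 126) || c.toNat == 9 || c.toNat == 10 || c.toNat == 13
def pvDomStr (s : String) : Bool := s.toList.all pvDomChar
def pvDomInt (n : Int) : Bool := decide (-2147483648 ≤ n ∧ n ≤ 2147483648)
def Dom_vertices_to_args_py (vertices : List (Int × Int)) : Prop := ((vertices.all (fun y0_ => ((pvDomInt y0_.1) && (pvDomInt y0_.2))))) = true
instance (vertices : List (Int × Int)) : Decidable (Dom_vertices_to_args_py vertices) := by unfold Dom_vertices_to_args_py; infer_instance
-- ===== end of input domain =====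

-- B fuses A's four min/max scans and the flatten loop into one single pass (objective: faster, constant factor).


-- ===== PORT A =====
-- min(...)/max(...) over the generators; .getD 0 is only reached on the empty list, which Pre_ excludes (Python raises ValueError there)
def vertices_to_args_py (vertices : List (Int × Int)) : List Int × Int × Int × Int × Int :=
  let min_x := (PySem.List.min? (vertices.map (fun v => v.1)) (fun y => y)).getD 0
  let max_x := (PySem.List.max? (vertices.map (fun v => v.1)) (fun y => y)).getD 0
  let min_y := (PySem.List.min? (vertices.map (fun v => v.2)) (fun y => y)).getD 0
  let max_y := (PySem.List.max? (vertices.map (fun v => v.2)) (fun y => y)).getD 0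
  let w := max_x - min_x
  let h := max_y - min_y
  let args := vertices.foldl (fun a v => a ++ [v.1, v.2]) []
  (args, min_x, min_y, w, h)

-- ===== PORT B =====
-- the single fused loop of Source B: four running extrema plus the flattened list
def vtaGo : List (Int × Int) → Int → Int → Int → Int → List Int → List Int × Int × Int × Int × Int
  | [], mnx, mxx, mny, mxy, args => (args, mnx, mny, mxx - mnx, mxy - mny)
  | (x, y) :: t, mnx, mxx, mny, mxy, args =>
      vtaGo t (if x < mnx then x else mnx) (if mxx < x then x else mxx)
              (if y < mny then y else mny) (if mxy < y then y else mxy)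
              (args ++ [x, y])

def vertices_to_args_py_alt (vertices : List (Int × Int)) : List Int × Int × Int × Int × Int :=
  match vertices with
  | [] => ([], 0, 0, 0, 0)   -- Source B raises ValueError here; outside Pre_
  | (x, y) :: _ => vtaGo vertices x x y y []

-- ===== PRECONDITION & SPEC =====
-- Pre_ excludes only the empty list, on which Python A raises ValueError (min() of an empty sequence)
def Pre_vertices_to_args_py (vertices : List (Int × Int)) : Prop := vertices ≠ []
instance (vertices : List (Int × Int)) : Decidable (Pre_vertices_to_args_py vertices) := by unfold Pre_vertices_to_args_py; infer_instance
def pvWitness_vertices_to_args_py : (List (Int × Int)) := [(1, 2), (-3, 4)]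
def Spec_vertices_to_args_py (vertices : List (Int × Int)) (out : List Int × Int × Int × Int × Int) : Prop := out = vertices_to_args_py_alt vertices
instance (vertices : List (Int × Int)) (out : List Int × Int × Int × Int × Int) : Decidable (Spec_vertices_to_args_py vertices out) := by unfold Spec_vertices_to_args_py; infer_instance

-- ===== CLAIM (what is proved, stated in full; the proofs are below) =====
def Claim_equal_vertices_to_args_py : Prop := ∀ (vertices : List (Int × Int)), Dom_vertices_to_args_py vertices → Pre_vertices_to_args_py vertices → Spec_vertices_to_args_py vertices (vertices_to_args_py vertices)

-- ===== LEMMAS AND PROOFS =====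
theorem if_lt_eq_min (a b : Int) : (if b < a then b else a) = min a b := by
  rw [min_def]; split_ifs <;> omega

theorem if_lt_eq_max (a b : Int) : (if a < b then b else a) = max a b := by
  rw [max_def]; split_ifs <;> omega

theorem vtaGo_eq (t : List (Int × Int)) : ∀ (mnx mxx mny mxy : Int) (args : List Int),
    vtaGo t mnx mxx mny mxy args =
      (t.foldl (fun a v => a ++ [v.1, v.2]) args,
       t.foldl (fun m v => min m v.1) mnx,
       t.foldl (fun m v => min m v.2) mny,
       t.foldl (fun m v => max m v.1) mxx - t.foldl (fun m v => min m v.1) mnx,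
       t.foldl (fun m v => max m v.2) mxy - t.foldl (fun m v => min m v.2) mny) := by
  induction t with
  | nil => intro mnx mxx mny mxy args; rfl
  | cons hd tl ih =>
      intro mnx mxx mny mxy args
      obtain ⟨x, y⟩ := hd
      simp only [vtaGo, List.foldl_cons, if_lt_eq_min, if_lt_eq_max]
      exact ih _ _ _ _ _

-- ===== VERDICT (by name: the statement is the Claim_ definition above) =====
theorem vertices_to_args_py_spec : Claim_equal_vertices_to_args_py := by
  intro vertices _ hpre
  unfold Spec_vertices_to_args_py
  match vertices with
  | [] => exact absurd rfl hpre
  | (x, y) :: t =>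
      simp only [vertices_to_args_py, vertices_to_args_py_alt, vtaGo_eq, List.map_cons,
        PySem.List.min?_id_cons, PySem.List.max?_id_cons, Option.getD_some, List.foldl_cons,
        List.foldl_map, min_self, max_self]
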